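-- pv_equiv track=rewrite | github.com/ronin207/sec-agent | backend/core/ai_audit_analyzer.py | _extract_vulnerability_patterns
-- ===== SOURCE A (Python) =====
-- from typing import List, Dict, Any, Optional
--
-- def _extract_vulnerability_patterns(knowledge: List[Dict]) -> Dict[str, List[str]]:
--     """
--     Extract common vulnerability patterns from knowledge base.
--
--     Args:
--         knowledge: List of findings from past audit reports
--
--     Returns:
--         Dictionary mapping vulnerability categories to patterns
--     """
--     patterns = {
--         "reentrancy": [],
--         "overflow": [],
--         "access_control": [],
--         "unchecked_return": [],
--         "gas_optimization": [],
--         "logic_issues": [],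
--         "oracle_manipulation": [],
--         "front_running": [],
--         "dos": [],
--         "other": []
--     }
--
--     # Process each finding to identify patterns
--     for finding in knowledge:
--         description = finding.get("description", "").lower()
--
--         if "reentrant" in description or "reentrancy" in description:
--             patterns["reentrancy"].append(description)
--         elif "overflow" in description or "underflow" in description:
--             patterns["overflow"].append(description)
--         elif "permission" in description or "access control" in description or "authorization" in description:
--             patterns["access_control"].append(description)
--         elif "return value" in description or "unchecked" in description:
--             patterns["unchecked_return"].append(description)
--         elif "gas" in description and ("optimization" in description or "efficient" in description):
--             patterns["gas_optimization"].append(description)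
--         elif "logic" in description or "business logic" in description:
--             patterns["logic_issues"].append(description)
--         elif "oracle" in description or "price manipulation" in description:
--             patterns["oracle_manipulation"].append(description)
--         elif "front-run" in description or "frontrun" in description:
--             patterns["front_running"].append(description)
--         elif "dos" in description or "denial of service" in description:
--             patterns["dos"].append(description)
--         else:
--             patterns["other"].append(description)
--
--     return patterns
-- ===== SOURCE B (Python) =====
-- from typing import List, Dict, Any, Optional
--
-- # Category-major staged partition: instead of classifying finding-by-finding with an
-- # if/elif chain, sieve the pool of lowercased descriptions once per category, in priority
-- # order; each stage takes its whole bucket and passes the rest on; leftovers are "other".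
--
-- def _match_reentrancy(d): return "reentrant" in d or "reentrancy" in d
-- def _match_overflow(d): return "overflow" in d or "underflow" in d
-- def _match_access_control(d): return "permission" in d or "access control" in d or "authorization" in d
-- def _match_unchecked_return(d): return "return value" in d or "unchecked" in d
-- def _match_gas_optimization(d): return "gas" in d and ("optimization" in d or "efficient" in d)
-- def _match_logic_issues(d): return "logic" in d or "business logic" in d
-- def _match_oracle_manipulation(d): return "oracle" in d or "price manipulation" in d
-- def _match_front_running(d): return "front-run" in d or "frontrun" in d
-- def _match_dos(d): return "dos" in d or "denial of service" in d
--
-- _STAGES = [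
--     ("reentrancy", _match_reentrancy),
--     ("overflow", _match_overflow),
--     ("access_control", _match_access_control),
--     ("unchecked_return", _match_unchecked_return),
--     ("gas_optimization", _match_gas_optimization),
--     ("logic_issues", _match_logic_issues),
--     ("oracle_manipulation", _match_oracle_manipulation),
--     ("front_running", _match_front_running),
--     ("dos", _match_dos),
-- ]
--
-- def _extract_vulnerability_patterns(knowledge: List[Dict]) -> Dict[str, List[str]]:
--     remaining = [f.get("description", "").lower() for f in knowledge]
--     patterns = {}
--     for cat, match in _STAGES:
--         taken = []
--         rest = []
--         for d in remaining:
--             (taken if match(d) else rest).append(d)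
--         patterns[cat] = taken
--         remaining = rest
--     patterns["other"] = remaining
--     return patterns
-- ===== Notes on version B (the rewrite author's own statement) =====
-- stated objective: alternative
-- what changed: Category-major staged sieve: instead of classifying each finding through the if/elif chain, B filters the whole pool of lowercased descriptions once per category in priority order, each stage taking its entire bucket in one split pass and handing the rest to the next stage, with leftovers becoming 'other'.
import Mathlib
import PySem

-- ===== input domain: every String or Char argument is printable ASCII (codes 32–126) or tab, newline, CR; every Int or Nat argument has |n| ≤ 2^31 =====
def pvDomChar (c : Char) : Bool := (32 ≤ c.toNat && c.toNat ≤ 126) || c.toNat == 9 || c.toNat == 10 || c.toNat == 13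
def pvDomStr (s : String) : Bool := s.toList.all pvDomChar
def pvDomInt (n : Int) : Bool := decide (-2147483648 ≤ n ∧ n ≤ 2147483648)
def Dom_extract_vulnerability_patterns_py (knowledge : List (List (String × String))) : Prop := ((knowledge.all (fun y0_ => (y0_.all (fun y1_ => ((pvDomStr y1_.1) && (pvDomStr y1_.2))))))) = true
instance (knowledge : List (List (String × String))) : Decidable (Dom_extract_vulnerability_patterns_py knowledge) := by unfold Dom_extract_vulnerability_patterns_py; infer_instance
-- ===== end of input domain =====

-- B replaces A's finding-by-finding if/elif classification with a category-major staged
-- sieve over the pool of lowercased descriptions (idiomatic decomposition, same cost).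

-- ===== PORT A =====
def pyA_step (patterns : PySem.Dict String (List String)) (finding : List (String × String)) : PySem.Dict String (List String) :=
  let description := PySem.Str.lower (PySem.Dict.getD ⟨finding⟩ "description" "")
  if PySem.Str.isIn "reentrant" description || PySem.Str.isIn "reentrancy" description then
    patterns.modify "reentrancy" [] (· ++ [description])
  else if PySem.Str.isIn "overflow" description || PySem.Str.isIn "underflow" description then
    patterns.modify "overflow" [] (· ++ [description])
  else if PySem.Str.isIn "permission" description || PySem.Str.isIn "access control" description || PySem.Str.isIn "authorization" description then
    patterns.modify "access_control" [] (· ++ [description])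
  else if PySem.Str.isIn "return value" description || PySem.Str.isIn "unchecked" description then
    patterns.modify "unchecked_return" [] (· ++ [description])
  else if PySem.Str.isIn "gas" description && (PySem.Str.isIn "optimization" description || PySem.Str.isIn "efficient" description) then
    patterns.modify "gas_optimization" [] (· ++ [description])
  else if PySem.Str.isIn "logic" description || PySem.Str.isIn "business logic" description then
    patterns.modify "logic_issues" [] (· ++ [description])
  else if PySem.Str.isIn "oracle" description || PySem.Str.isIn "price manipulation" description then
    patterns.modify "oracle_manipulation" [] (· ++ [description])
  else if PySem.Str.isIn "front-run" description || PySem.Str.isIn "frontrun" description then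
    patterns.modify "front_running" [] (· ++ [description])
  else if PySem.Str.isIn "dos" description || PySem.Str.isIn "denial of service" description then
    patterns.modify "dos" [] (· ++ [description])
  else
    patterns.modify "other" [] (· ++ [description])

def extract_vulnerability_patterns_py (knowledge : List (List (String × String))) : List (String × List String) :=
  let patterns : PySem.Dict String (List String) := PySem.Dict.ofList
    [("reentrancy", []), ("overflow", []), ("access_control", []), ("unchecked_return", []),
     ("gas_optimization", []), ("logic_issues", []), ("oracle_manipulation", []),
     ("front_running", []), ("dos", []), ("other", [])]
  (knowledge.foldl pyA_step patterns).items

-- ===== PORT B =====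
def pyB_match_reentrancy (d : String) : Bool := PySem.Str.isIn "reentrant" d || PySem.Str.isIn "reentrancy" d
def pyB_match_overflow (d : String) : Bool := PySem.Str.isIn "overflow" d || PySem.Str.isIn "underflow" d
def pyB_match_access_control (d : String) : Bool := PySem.Str.isIn "permission" d || PySem.Str.isIn "access control" d || PySem.Str.isIn "authorization" d
def pyB_match_unchecked_return (d : String) : Bool := PySem.Str.isIn "return value" d || PySem.Str.isIn "unchecked" d
def pyB_match_gas_optimization (d : String) : Bool := PySem.Str.isIn "gas" d && (PySem.Str.isIn "optimization" d || PySem.Str.isIn "efficient" d)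
def pyB_match_logic_issues (d : String) : Bool := PySem.Str.isIn "logic" d || PySem.Str.isIn "business logic" d
def pyB_match_oracle_manipulation (d : String) : Bool := PySem.Str.isIn "oracle" d || PySem.Str.isIn "price manipulation" d
def pyB_match_front_running (d : String) : Bool := PySem.Str.isIn "front-run" d || PySem.Str.isIn "frontrun" d
def pyB_match_dos (d : String) : Bool := PySem.Str.isIn "dos" d || PySem.Str.isIn "denial of service" d

def pyB_stages : List (String × (String → Bool)) :=
  [("reentrancy", pyB_match_reentrancy), ("overflow", pyB_match_overflow),
   ("access_control", pyB_match_access_control), ("unchecked_return", pyB_match_unchecked_return),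
   ("gas_optimization", pyB_match_gas_optimization), ("logic_issues", pyB_match_logic_issues),
   ("oracle_manipulation", pyB_match_oracle_manipulation), ("front_running", pyB_match_front_running),
   ("dos", pyB_match_dos)]

-- one stage: a single pass over the pool splitting it into (taken, rest), as Source B's inner loop
def pyB_split (m : String → Bool) (remaining : List String) : List String × List String :=
  remaining.foldl (fun acc d => if m d then (acc.1 ++ [d], acc.2) else (acc.1, acc.2 ++ [d])) ([], [])

def pyB_sieve : List (String × (String → Bool)) → List String → List (String × List String)
  | [], remaining => [("other", remaining)]
  | (cat, m) :: stages, remaining =>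
      let tr := pyB_split m remaining
      (cat, tr.1) :: pyB_sieve stages tr.2

def extract_vulnerability_patterns_py_alt (knowledge : List (List (String × String))) : List (String × List String) :=
  pyB_sieve pyB_stages (knowledge.map (fun f => PySem.Str.lower (PySem.Dict.getD ⟨f⟩ "description" "")))

-- ===== PRECONDITION & SPEC =====
def Spec_extract_vulnerability_patterns_py (knowledge : List (List (String × String))) (out : List (String × List String)) : Prop := out = extract_vulnerability_patterns_py_alt knowledge
instance (knowledge : List (List (String × String))) (out : List (String × List String)) : Decidable (Spec_extract_vulnerability_patterns_py knowledge out) := by unfold Spec_extract_vulnerability_patterns_py; infer_instance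

-- ===== CLAIM (what is proved, stated in full; the proofs are below) =====
def Claim_equal_extract_vulnerability_patterns_py : Prop := ∀ (knowledge : List (List (String × String))), Dom_extract_vulnerability_patterns_py knowledge → Spec_extract_vulnerability_patterns_py knowledge (extract_vulnerability_patterns_py knowledge)

-- ===== LEMMAS AND PROOFS =====

-- the category A's if/elif chain selects, abstracted
def pyA_cat (d : String) : String :=
  if pyB_match_reentrancy d then "reentrancy"
  else if pyB_match_overflow d then "overflow"
  else if pyB_match_access_control d then "access_control"
  else if pyB_match_unchecked_return d then "unchecked_return"
  else if pyB_match_gas_optimization d then "gas_optimization"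
  else if pyB_match_logic_issues d then "logic_issues"
  else if pyB_match_oracle_manipulation d then "oracle_manipulation"
  else if pyB_match_front_running d then "front_running"
  else if pyB_match_dos d then "dos"
  else "other"

def pyKeys10 : List String :=
  ["reentrancy", "overflow", "access_control", "unchecked_return", "gas_optimization",
   "logic_issues", "oracle_manipulation", "front_running", "dos", "other"]

set_option maxHeartbeats 1000000 in
theorem pyA_step_eq (p : PySem.Dict String (List String)) (f : List (String × String)) :
    pyA_step p f =
      p.modify (pyA_cat (PySem.Str.lower (PySem.Dict.getD ⟨f⟩ "description" "")))
        [] (· ++ [PySem.Str.lower (PySem.Dict.getD ⟨f⟩ "description" "")]) := by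
  unfold pyA_step pyA_cat pyB_match_reentrancy pyB_match_overflow pyB_match_access_control
    pyB_match_unchecked_return pyB_match_gas_optimization pyB_match_logic_issues
    pyB_match_oracle_manipulation pyB_match_front_running pyB_match_dos
  dsimp only
  split_ifs <;> rfl

theorem pyA_cat_mem (d : String) : pyA_cat d ∈ pyKeys10 := by
  unfold pyA_cat pyKeys10; split_ifs <;> simp

theorem set_update_of_subset (s xs : List String) (h : ∀ x ∈ xs, x ∈ s) :
    PySem.Set.update s xs = s := by
  induction xs generalizing s with
  | nil => rfl
  | cons x xs ih =>
      have hx : x ∈ s := h x (by simp)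
      have : PySem.Set.add s x = s := by
        simp [PySem.Set.add, PySem.Set.contains, hx]
      simp only [PySem.Set.update, List.foldl_cons] at *
      rw [this]
      exact ih s (fun y hy => h y (by simp [hy]))

theorem split_spec (m : String → Bool) (l : List String) :
    pyB_split m l = (l.filter m, l.filter (fun d => !m d)) := by
  unfold pyB_split
  suffices h : ∀ t r : List String,
      l.foldl (fun acc d => if m d then (acc.1 ++ [d], acc.2) else (acc.1, acc.2 ++ [d])) (t, r)
        = (t ++ l.filter m, r ++ l.filter (fun d => !m d)) by
    simpa using h [] []
  induction l with
  | nil => simp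
  | cons x xs ih =>
      intro t r
      by_cases hx : m x <;> simp [hx, ih]

-- proof-side name for A's initial dict
def pyInit : PySem.Dict String (List String) := PySem.Dict.ofList
  [("reentrancy", []), ("overflow", []), ("access_control", []), ("unchecked_return", []),
   ("gas_optimization", []), ("logic_issues", []), ("oracle_manipulation", []),
   ("front_running", []), ("dos", []), ("other", [])]

theorem pyInit_getD : ∀ k ∈ pyKeys10, pyInit.getD k [] = [] := by decide

theorem pyInit_keys : pyInit.keys = pyKeys10 := by decide

-- ===== VERDICT (by name: the statement is the Claim_ definition above) =====
set_option maxHeartbeats 2000000 in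
theorem extract_vulnerability_patterns_py_spec : Claim_equal_extract_vulnerability_patterns_py := by
  intro knowledge _
  unfold Spec_extract_vulnerability_patterns_py extract_vulnerability_patterns_py extract_vulnerability_patterns_py_alt
  dsimp only
  set descs := knowledge.map (fun f => PySem.Str.lower (PySem.Dict.getD ⟨f⟩ "description" "")) with hdescs
  have hstep : pyA_step = fun d f =>
      d.modify (pyA_cat (PySem.Str.lower (PySem.Dict.getD ⟨f⟩ "description" "")))
        [] (· ++ [PySem.Str.lower (PySem.Dict.getD ⟨f⟩ "description" "")]) :=
    funext fun d => funext fun f => pyA_step_eq d f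
  set l := descs.map (fun d => (pyA_cat d, d)) with hl
  have hfold : knowledge.foldl pyA_step pyInit
      = l.foldl (fun d p => d.modify p.1 [] (· ++ [p.2])) pyInit := by
    rw [hstep, hl, hdescs, List.map_map, List.foldl_map]
    simp only [Function.comp_def]
  set D := l.foldl (fun d p => d.modify p.1 [] (· ++ [p.2])) pyInit with hD
  have hkeys : D.keys = pyKeys10 := by
    rw [hD, PySem.Dict.keys_foldl_modify_key l Prod.fst [] (fun _ p => (· ++ [p.2])) pyInit,
      pyInit_keys, hl, List.map_map]
    exact set_update_of_subset _ _ (by simp [Function.comp_def]; intro d _; exact pyA_cat_mem d)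
  have hnd : D.keys.Nodup := by rw [hkeys]; decide
  have hA : D.items = pyKeys10.map (fun k => (k, descs.filter (fun d => pyA_cat d == k))) := by
    rw [PySem.Dict.items_eq_map_keys D hnd [], hkeys]
    refine List.map_congr_left (fun k hk => ?_)
    rw [hD, PySem.Dict.getD_foldl_modify_append l pyInit k, pyInit_getD k hk,
      List.nil_append, hl, List.filter_map, List.map_map]
    simp [Function.comp_def]
  have hB : pyB_sieve pyB_stages descs
      = pyKeys10.map (fun k => (k, descs.filter (fun d => pyA_cat d == k))) := by
    simp only [pyB_sieve, pyB_stages, split_spec, pyKeys10, List.map_cons, List.map_nil,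
      List.filter_filter, List.cons.injEq, Prod.mk.injEq, true_and, and_true]
    refine ⟨?_, ?_, ?_, ?_, ?_, ?_, ?_, ?_, ?_, ?_⟩ <;>
      exact List.filter_congr (fun d _ => by unfold pyA_cat; split_ifs <;> simp_all)
  show (knowledge.foldl pyA_step pyInit).items = pyB_sieve pyB_stages descs
  rw [hfold, hA, hB]
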